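-- pv_equiv track=rewrite | github.com/riabha/t | backend/solver_backup_20260227.py | get_lab_starts
-- ===== SOURCE A (Python) =====
-- LAB_STARTS_FRI = [0, 1, 2]      # yields blocks [0,1,2], [1,2,3], [2,3,4]
--
-- def get_lab_starts(day: int, break_slot: int = 2, is_morning_lab: bool = False):
--     """Return valid starting slot indices for a 3-hour lab block."""
--     if day == 4:
--         return LAB_STARTS_FRI
--
--     # Mon-Thu: Lab needs 3 contiguous slots that don't include the break slot
--     valid_starts = []
--     # Check all possible start positions (0 to 5 for 8 slots)
--     for s in range(8 - 2):
--         block = [s, s+1, s+2]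
--         if break_slot not in block:
--             valid_starts.append(s)
--
--     # Note: the is_morning_lab preference is handled by variable costs and
--     # the solver's objective function to prioritize early slots.
--     return valid_starts
-- ===== SOURCE B (Python) =====
-- LAB_STARTS_FRI = [0, 1, 2]
--
-- def get_lab_starts(day: int, break_slot: int = 2, is_morning_lab: bool = False):
--     """Return valid starting slot indices for a 3-hour lab block."""
--     if day == 4:
--         return LAB_STARTS_FRI
--     # Closed form: the excluded block is the contiguous run break_slot-2..break_slot,
--     # so the valid starts are two clamped ranges around it.
--     return list(range(0, min(6, break_slot - 2))) + list(range(max(0, break_slot + 1), 6))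
-- ===== Notes on version B (the rewrite author's own statement) =====
-- stated objective: simpler
-- what changed: Replaces the scan over all 6 candidate start slots with a membership test per slot by a closed-form answer: the two clamped contiguous ranges around the excluded break block.
import Mathlib
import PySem

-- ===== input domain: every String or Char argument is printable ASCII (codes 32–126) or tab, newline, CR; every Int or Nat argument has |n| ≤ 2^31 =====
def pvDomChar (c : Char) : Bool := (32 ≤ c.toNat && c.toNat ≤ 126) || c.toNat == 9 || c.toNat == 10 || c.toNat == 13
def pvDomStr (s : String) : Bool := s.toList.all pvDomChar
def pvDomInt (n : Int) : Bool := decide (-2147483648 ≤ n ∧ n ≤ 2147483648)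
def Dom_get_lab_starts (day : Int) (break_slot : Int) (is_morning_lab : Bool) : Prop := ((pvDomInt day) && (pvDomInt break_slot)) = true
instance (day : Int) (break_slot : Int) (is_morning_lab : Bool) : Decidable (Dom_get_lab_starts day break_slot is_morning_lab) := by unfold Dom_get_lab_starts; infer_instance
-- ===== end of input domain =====

-- B replaces A's scan-and-filter loop over candidate starts by a closed form:
-- the two clamped contiguous ranges around the excluded break block (objective: simpler).

-- ===== PORT A =====
def LAB_STARTS_FRI : List Int := [0, 1, 2]

def get_lab_starts (day : Int) (break_slot : Int) (is_morning_lab : Bool) : List Int :=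
  if day == 4 then LAB_STARTS_FRI
  else
    (PySem.List.pyRange 0 (8 - 2) 1).foldl
      (fun valid_starts s =>
        let block : List Int := [s, s + 1, s + 2]
        if ¬ break_slot ∈ block then valid_starts ++ [s] else valid_starts) []

-- ===== PORT B =====
def get_lab_starts_alt (day : Int) (break_slot : Int) (is_morning_lab : Bool) : List Int :=
  if day == 4 then LAB_STARTS_FRI
  else
    PySem.List.pyRange 0 (min 6 (break_slot - 2)) 1 ++
    PySem.List.pyRange (max 0 (break_slot + 1)) 6 1

-- ===== PRECONDITION & SPEC =====
def Spec_get_lab_starts (day : Int) (break_slot : Int) (is_morning_lab : Bool) (out : List Int) : Prop := out = get_lab_starts_alt day break_slot is_morning_lab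
instance (day : Int) (break_slot : Int) (is_morning_lab : Bool) (out : List Int) : Decidable (Spec_get_lab_starts day break_slot is_morning_lab out) := by unfold Spec_get_lab_starts; infer_instance

-- ===== CLAIM (what is proved, stated in full; the proofs are below) =====
def Claim_equal_get_lab_starts : Prop := ∀ (day : Int) (break_slot : Int) (is_morning_lab : Bool), Dom_get_lab_starts day break_slot is_morning_lab → Spec_get_lab_starts day break_slot is_morning_lab (get_lab_starts day break_slot is_morning_lab)

-- ===== LEMMAS AND PROOFS =====

-- The loop body appends exactly the candidates outside the break block.
theorem get_lab_starts_body (break_slot : Int) :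
    (PySem.List.pyRange 0 (8 - 2) 1).foldl
      (fun valid_starts s =>
        let block : List Int := [s, s + 1, s + 2]
        if ¬ break_slot ∈ block then valid_starts ++ [s] else valid_starts) [] =
    (PySem.List.pyRange 0 6 1).filter
      (fun s => decide (¬ break_slot ∈ ([s, s + 1, s + 2] : List Int))) := by
  show (PySem.List.pyRange 0 6 1).foldl _ [] = _
  rw [PySem.List.foldl_append_ite_eq_filter]
  simp

theorem filter_eq_two_ranges (b : Int) :
    (PySem.List.pyRange 0 6 1).filter
      (fun s => decide (¬ b ∈ ([s, s + 1, s + 2] : List Int))) =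
    PySem.List.pyRange 0 (min 6 (b - 2)) 1 ++ PySem.List.pyRange (max 0 (b + 1)) 6 1 := by
  by_cases h : 0 ≤ b ∧ b ≤ 7
  · obtain ⟨h1, h2⟩ := h
    interval_cases b <;> decide
  · have hmin : min 6 (b - 2) = if b ≤ 7 then b - 2 else 6 := by
      split_ifs <;> omega
    have : (PySem.List.pyRange 0 6 1).filter
        (fun s => decide (¬ b ∈ ([s, s + 1, s + 2] : List Int))) =
        PySem.List.pyRange 0 6 1 := by
      apply List.filter_eq_self.mpr
      intro s hs
      rw [PySem.List.mem_pyRange_one] at hs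
      simp only [List.mem_cons, List.not_mem_nil, decide_eq_true_eq, or_false]
      omega
    rw [this]
    rcases Int.lt_or_le b 0 with hb | hb
    · rw [PySem.List.pyRange_one_eq_nil (by omega : min 6 (b - 2) ≤ 0)]
      have hmax : max 0 (b + 1) = 0 := by omega
      rw [hmax]; rfl
    · have h8 : 8 ≤ b := by omega
      rw [PySem.List.pyRange_one_eq_nil (by omega : (6 : Int) ≤ max 0 (b + 1))]
      have hmin6 : min 6 (b - 2) = 6 := by omega
      rw [hmin6]; simp

-- ===== VERDICT (by name: the statement is the Claim_ definition above) =====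
theorem get_lab_starts_spec : Claim_equal_get_lab_starts := by
  intro day break_slot is_morning_lab _
  unfold Spec_get_lab_starts get_lab_starts get_lab_starts_alt
  by_cases hd : day == 4
  · simp [hd]
  · simp only [hd, Bool.false_eq_true, if_false]
    rw [get_lab_starts_body, filter_eq_two_ranges]
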